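-- pv_equiv track=rewrite | github.com/woodywarhol9/algorithm-practice | programmers/solved/lv2_[3차]n진수게임.py | solution
-- ===== SOURCE A (Python) =====
-- def get_nbase(n: int, i: int) -> str:
--     nbase = ""
--     over_10 = {10 : "A", 11 : "B", 12 : "C", 13 : "D", 14 : "E", 15 : "F"}
--     while i:
--         q, r = divmod(i, n)
--         # 초기화
--         i = q
--         if r in over_10:
--             r = over_10[r]
--         nbase += str(r)
--     return nbase[::-1]
--
-- def solution(n, t, m, p):
--     # 튜브의 대답
--     answer_list = []
--     # n 진법 정보
--     nbase_list = ["0"]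
--     # 미리 n진법 숫자 구해두기
--     for i in range(1, t * m):
--         nbase_list.append(get_nbase(n, i))
--     # N 진수 게임 시작
--     cnt = 0
--     for num in nbase_list:
--         # 1 글자씩
--         for digit in num:
--             # 튜브 순서일 경우
--             if cnt % m == p - 1:
--                 answer_list.append(digit)
--             cnt += 1
--             # 게임 끝
--             if cnt >= t * m:
--                 break
--         if cnt >= t * m:
--             break
--
--     return "".join(answer_list)
-- ===== SOURCE B (Python) =====
-- def _digits(n, i):
--     # base-n representation of i, same digit rendering as the game table
--     if i == 0:
--         return "0"
--     chunks = []
--     while i: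
--         i, r = divmod(i, n)
--         chunks.append(str(r) if r < 10 or r > 15 else "ABCDEF"[r - 10])
--     return "".join(chunks)[::-1]
--
--
-- def solution(n, t, m, p):
--     if p < 1 or p > m or t < 1:
--         return ""
--     total = t * m
--     out = []
--     nxt = p - 1   # global index of the next digit the tube says
--     pos = 0       # global index of the first digit of number i
--     i = 0
--     while nxt < total:
--         d = _digits(n, i)
--         while nxt < pos + len(d) and nxt < total:
--             out.append(d[nxt - pos])
--             nxt += m
--         pos += len(d)
--         i += 1
--     return "".join(out)
-- ===== Notes on version B (the rewrite author's own statement) =====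
-- stated objective: faster
-- what changed: A precomputes the base-n strings of all t*m numbers and then scans every digit with a counter and modulo test; B generates numbers lazily, jumps a pick pointer forward by m inside each number's digit window, and stops as soon as the t*m-th stream digit is passed, so it materialises only ~t*m digits instead of all Theta(t*m*log(t*m)) of them.
-- intended difference: For t <= 0 with p = 1 (a game with no rounds), A still emits the digit '0' before noticing the game is over and returns "0", while B returns "", the intended answer for zero rounds. — e.g. on solution(2, 0, 1, 1): A returns "0", B returns ""
-- outside the precondition, e.g. on solution(2, 1, -2, 1): A returns '0', B returns ''
import Mathlib
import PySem

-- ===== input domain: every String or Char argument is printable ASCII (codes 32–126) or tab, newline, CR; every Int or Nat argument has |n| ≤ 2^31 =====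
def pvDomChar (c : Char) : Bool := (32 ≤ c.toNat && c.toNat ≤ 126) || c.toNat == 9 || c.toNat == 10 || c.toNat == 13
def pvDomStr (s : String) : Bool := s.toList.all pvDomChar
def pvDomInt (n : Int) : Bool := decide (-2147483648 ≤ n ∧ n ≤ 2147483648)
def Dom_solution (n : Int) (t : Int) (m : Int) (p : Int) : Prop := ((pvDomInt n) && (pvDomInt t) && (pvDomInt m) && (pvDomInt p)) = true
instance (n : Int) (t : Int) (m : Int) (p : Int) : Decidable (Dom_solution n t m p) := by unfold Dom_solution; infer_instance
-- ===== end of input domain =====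

-- B generates the digit stream lazily, jumping the pick pointer by m, instead of
-- precomputing all t*m base-n strings and scanning every digit (objective: faster).


-- ===== PORT A =====
-- over_10 = {10:"A", …, 15:"F"}
def over10 : PySem.Dict Int String :=
  PySem.Dict.ofList [(10, "A"), (11, "B"), (12, "C"), (13, "D"), (14, "E"), (15, "F")]

-- 'while i:' loop of get_nbase; fuel i.natAbs+1 is enough whenever |n| ≥ 2 (number of
-- divmod steps ≤ |i|+1), and Pre_ admits |n| ≤ 1 only when get_nbase is never called;
-- the fuel only makes the port total.
def getNbaseGo (n : Int) : Nat → Int → String → String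
  | 0, _, acc => acc
  | fuel + 1, i, acc =>
    if i = 0 then acc
    else
      let q := PySem.Int.floordiv i n
      let r := PySem.Int.mod i n
      let rs := match PySem.Dict.get? over10 r with
                | some s => s                    -- r = over_10[r]
                | none => PySem.Int.toStr r      -- str(r)
      getNbaseGo n fuel q (acc ++ rs)

-- nbase[::-1] reverses code points: String.ofList (….toList.reverse), exact per Str.slice?_none_none_neg_one
def getNbase (n : Int) (i : Int) : String :=
  String.ofList (getNbaseGo n (i.natAbs + 1) i "").toList.reverse

-- inner 'for digit in num' loop: returns (answer_list, cnt, broke?)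
def solInner (m p tm : Int) : List Char → Int → List Char → (List Char × Int × Bool)
  | [], cnt, acc => (acc, cnt, false)
  | c :: rest, cnt, acc =>
    let acc' := if PySem.Int.mod cnt m = p - 1 then acc ++ [c] else acc
    let cnt' := cnt + 1
    if tm ≤ cnt' then (acc', cnt', true)
    else solInner m p tm rest cnt' acc'

-- outer 'for num in nbase_list' loop
def solOuter (m p tm : Int) : List String → Int → List Char → List Char
  | [], _, acc => acc
  | s :: rest, cnt, acc =>
    let r := solInner m p tm s.toList cnt acc
    if r.2.2 then r.1
    else if tm ≤ r.2.1 then r.1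
    else solOuter m p tm rest r.2.1 r.1

def solution (n : Int) (t : Int) (m : Int) (p : Int) : String :=
  String.ofList (solOuter m p (t * m) ("0" :: (PySem.List.pyRange 1 (t * m) 1).map (getNbase n)) 0 [])

-- ===== PORT B =====
-- str(r) if r < 10 or r > 15 else "ABCDEF"[r-10]
def digitChunk (r : Int) : String :=
  if r < 10 ∨ 15 < r then PySem.Int.toStr r
  else match PySem.Str.pyGet? "ABCDEF" (r - 10) with
       | some c => String.ofList [c]
       | none => ""                               -- unreachable: 0 ≤ r-10 < 6 here

-- the 'while i:' chunk loop of _digits (same fuel policy as port A)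
def digitsGo (n : Int) : Nat → Int → List String → List String
  | 0, _, acc => acc
  | fuel + 1, i, acc =>
    if i = 0 then acc
    else digitsGo n fuel (PySem.Int.floordiv i n) (acc ++ [digitChunk (PySem.Int.mod i n)])

-- "".join(chunks)[::-1]
def digitsB (n : Int) (i : Int) : String :=
  if i = 0 then "0"
  else String.ofList (PySem.Chars.join [] ((digitsGo n (i.natAbs + 1) i []).map String.toList)).reverse

-- inner 'while nxt < pos + len(d) and nxt < total' loop; fuel d.length+1 is enough (m ≥ 1)
def altInner (m tm : Int) (d : List Char) (pos : Int) : Nat → Int → List Char → (List Char × Int)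
  | 0, nxt, out => (out, nxt)
  | fuel + 1, nxt, out =>
    if nxt < pos + (d.length : Int) ∧ nxt < tm then
      match PySem.List.pyGet? d (nxt - pos) with   -- d[nxt - pos]
      | some c => altInner m tm d pos fuel (nxt + m) (out ++ [c])
      | none => (out, nxt)                         -- unreachable: 0 ≤ nxt-pos < len d
    else (out, nxt)

-- outer 'while nxt < total' loop; ≤ tm numbers are ever touched, fuel tm.natAbs+1 is enough
def altOuter (n m tm : Int) : Nat → Int → Int → Int → List Char → List Char
  | 0, _, _, _, out => out
  | fuel + 1, i, pos, nxt, out =>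
    if nxt < tm then
      let d := (digitsB n i).toList
      let r := altInner m tm d pos (d.length + 1) nxt out
      altOuter n m tm fuel (i + 1) (pos + (d.length : Int)) r.2 r.1
    else out

def solution_alt (n : Int) (t : Int) (m : Int) (p : Int) : String :=
  if p < 1 ∨ m < p ∨ t < 1 then ""
  else String.ofList (altOuter n m (t * m) ((t * m).natAbs + 1) 0 0 (p - 1) [])

-- ===== PRECONDITION & SPEC =====
-- Pre_ excludes: n ∈ {-1,0,1} when t*m ≥ 2 (there get_nbase loops forever for n = ±1
-- and raises ZeroDivisionError for n = 0; for t*m ≤ 1 get_nbase is never called and any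
-- n is fine), m = 0 (A raises ZeroDivisionError at 'cnt % m'), and m < 0, where "every
-- m-th digit" is meaningless and A's picks are an artefact of Python's negative modulo
-- (cite: (2,1,-2,1) → A "0", B "").
def Pre_solution (n : Int) (t : Int) (m : Int) (p : Int) : Prop :=
  1 ≤ m ∧ (n ≤ -2 ∨ 2 ≤ n ∨ t * m ≤ 1)
instance (n : Int) (t : Int) (m : Int) (p : Int) : Decidable (Pre_solution n t m p) := by
  unfold Pre_solution; infer_instance

def pvWitness_solution : Int × Int × Int × Int := (2, 3, 2, 1)

-- For t ≤ 0 with p = 1 (a game with no rounds), A still emits the digit '0' before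
-- noticing the game is over and returns "0", while B returns "", the intended answer
-- for zero rounds.
def D_solution (n : Int) (t : Int) (m : Int) (p : Int) : Prop := t ≤ 0 ∧ p = 1
instance (n : Int) (t : Int) (m : Int) (p : Int) : Decidable (D_solution n t m p) := by
  unfold D_solution; infer_instance

def Spec_solution (n : Int) (t : Int) (m : Int) (p : Int) (out : String) : Prop :=
  ¬ D_solution n t m p → out = solution_alt n t m p
instance (n : Int) (t : Int) (m : Int) (p : Int) (out : String) : Decidable (Spec_solution n t m p out) := by
  unfold Spec_solution; infer_instance

def pvDiffWitness_solution : Int × Int × Int × Int := (2, 0, 1, 1)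
def pvDiffWitnessOut_solution : String × String := ("0", "")

-- ===== CLAIM (what is proved, stated in full; the proofs are below) =====
def Claim_unchanged_solution : Prop := ∀ (n : Int) (t : Int) (m : Int) (p : Int), Dom_solution n t m p → Pre_solution n t m p → Spec_solution n t m p (solution n t m p)
def Claim_changed_solution : Prop := Dom_solution (pvDiffWitness_solution.1) (pvDiffWitness_solution.2.1) (pvDiffWitness_solution.2.2.1) (pvDiffWitness_solution.2.2.2) ∧ Pre_solution (pvDiffWitness_solution.1) (pvDiffWitness_solution.2.1) (pvDiffWitness_solution.2.2.1) (pvDiffWitness_solution.2.2.2) ∧ D_solution (pvDiffWitness_solution.1) (pvDiffWitness_solution.2.1) (pvDiffWitness_solution.2.2.1) (pvDiffWitness_solution.2.2.2) ∧ solution (pvDiffWitness_solution.1) (pvDiffWitness_solution.2.1) (pvDiffWitness_solution.2.2.1) (pvDiffWitness_solution.2.2.2) = pvDiffWitnessOut_solution.1 ∧ solution_alt (pvDiffWitness_solution.1) (pvDiffWitness_solution.2.1) (pvDiffWitness_solution.2.2.1) (pvDiffWitness_solution.2.2.2) = pvDiffWitnessOut_solution.2 ∧ pvDiffWitnessOut_solution.1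 ≠ pvDiffWitnessOut_solution.2
def Claim_exact_solution : Prop := ∀ (n : Int) (t : Int) (m : Int) (p : Int), Dom_solution n t m p → Pre_solution n t m p → D_solution n t m p → solution n t m p ≠ solution_alt n t m p

-- ===== LEMMAS AND PROOFS =====

-- ---------- generic facts ----------

theorem toDigitsCore_len (b : Nat) : ∀ (f n : Nat) (l : List Char), 1 ≤ f →
    l.length + 1 ≤ (Nat.toDigitsCore b f n l).length := by
  intro f
  induction f with
  | zero => omega
  | succ f ih =>
    intro n l _
    simp only [Nat.toDigitsCore]
    split
    · simp
    · by_cases hf : 1 ≤ f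
      · have := ih (n / b) ((n % b).digitChar :: l) hf
        simp at this ⊢; omega
      · interval_cases f
        simp [Nat.toDigitsCore]

theorem toChars_ne_nil (x : Int) : PySem.Int.toChars x ≠ [] := by
  unfold PySem.Int.toChars
  split
  · simp
  · have := toDigitsCore_len 10 (x.toNat + 1) x.toNat [] (by omega)
    simp only [Nat.toDigits]
    intro h; rw [h] at this; simp at this

theorem intersperse_nil_flatten (xss : List (List Char)) :
    (List.intersperse ([] : List Char) xss).flatten = xss.flatten := by
  induction xss with
  | nil => rfl
  | cons x xs ih => cases xs <;> simp_all [List.intersperse]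

theorem join_nil_eq_flatten (xss : List (List Char)) :
    PySem.Chars.join [] xss = xss.flatten := by
  simp [PySem.Chars.join, List.intercalate, intersperse_nil_flatten]

-- ---------- the two digit-string builders agree ----------

theorem chunk_eq (r : Int) :
    (match PySem.Dict.get? over10 r with
     | some s => s
     | none => PySem.Int.toStr r) = digitChunk r := by
  by_cases h : 10 ≤ r ∧ r ≤ 15
  · obtain ⟨h1, h2⟩ := h
    interval_cases r <;> rfl
  · have hnone : PySem.Dict.get? over10 r = none := by
      have h10 : ¬((10 : Int) == r) := by simp; omega
      have h11 : ¬((11 : Int) == r) := by simp; omega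
      have h12 : ¬((12 : Int) == r) := by simp; omega
      have h13 : ¬((13 : Int) == r) := by simp; omega
      have h14 : ¬((14 : Int) == r) := by simp; omega
      have h15 : ¬((15 : Int) == r) := by simp; omega
      simp only [over10, PySem.Dict.get?]
      simp [PySem.Dict.ofList, PySem.Dict.update, PySem.Dict.empty, PySem.Dict.insert, List.find?, h10, h11, h12, h13, h14, h15]
    rw [hnone]
    unfold digitChunk
    rw [if_pos (by omega)]

theorem go_eq (n : Int) : ∀ (fuel : Nat) (i : Int) (accS : String) (accL : List String),
    accS.toList = (accL.map String.toList).flatten →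
    (getNbaseGo n fuel i accS).toList = ((digitsGo n fuel i accL).map String.toList).flatten := by
  intro fuel
  induction fuel with
  | zero => intro i accS accL h; simpa [getNbaseGo, digitsGo] using h
  | succ fuel ih =>
    intro i accS accL h
    by_cases hi : i = 0
    · simpa [getNbaseGo, digitsGo, hi] using h
    · simp only [getNbaseGo, digitsGo, if_neg hi]
      apply ih
      simp [h, chunk_eq]

theorem digits_match (n i : Int) (hi : i ≠ 0) : getNbase n i = digitsB n i := by
  unfold getNbase digitsB
  rw [if_neg hi, join_nil_eq_flatten]
  have := go_eq n (i.natAbs + 1) i "" [] (by simp)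
  rw [this]

theorem digitsB_ne_nil (n i : Int) : (digitsB n i).toList ≠ [] := by
  unfold digitsB
  by_cases hi : i = 0
  · simp [hi]
  · rw [if_neg hi]
    have grow : ∀ (fuel : Nat) (j : Int) (acc : List String),
        ∃ rest, digitsGo n fuel j acc = acc ++ rest := by
      intro fuel
      induction fuel with
      | zero => intro j acc; exact ⟨[], by simp [digitsGo]⟩
      | succ fuel ih =>
        intro j acc
        by_cases hj : j = 0
        · exact ⟨[], by simp [digitsGo, hj]⟩
        · obtain ⟨rest, hr⟩ := ih (PySem.Int.floordiv j n) (acc ++ [digitChunk (PySem.Int.mod j n)])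
          exact ⟨digitChunk (PySem.Int.mod j n) :: rest, by simp [digitsGo, if_neg hj, hr]⟩
    obtain ⟨f, hf⟩ : ∃ f, i.natAbs + 1 = f + 1 := ⟨i.natAbs, rfl⟩
    rw [hf]
    simp only [digitsGo, if_neg hi]
    obtain ⟨rest, hr⟩ := grow f (PySem.Int.floordiv i n) ([] ++ [digitChunk (PySem.Int.mod i n)])
    rw [hr]
    have hchunk : (digitChunk (PySem.Int.mod i n)).toList ≠ [] := by
      unfold digitChunk
      split
      · simp only [PySem.Int.toStr]
        intro h
        exact toChars_ne_nil _ (by simpa [PySem.Int.toList_toStr] using h)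
      · rename_i hrng
        have h1 : 10 ≤ PySem.Int.mod i n := by omega
        have h2 : PySem.Int.mod i n ≤ 15 := by omega
        set r := PySem.Int.mod i n with hr'
        interval_cases r <;> simp
    rcases hch : (digitChunk (PySem.Int.mod i n)).toList with _ | ⟨a, as⟩
    · exact absurd hch hchunk
    · simp [join_nil_eq_flatten, hch]

-- ---------- A's loops = chPick over the concatenated stream ----------

def chPick (m p tm : Int) : List Char → Int → List Char
  | [], _ => []
  | c :: rest, cnt =>
    if tm ≤ cnt then []
    else (if PySem.Int.mod cnt m = p - 1 then [c] else []) ++ chPick m p tm rest (cnt + 1)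

theorem chPick_stop (m p tm : Int) (cs : List Char) (cnt : Int) (h : tm ≤ cnt) :
    chPick m p tm cs cnt = [] := by
  cases cs <;> simp [chPick, h]

theorem solInner_append (m p tm : Int) : ∀ (xs ys : List Char) (cnt : Int) (acc : List Char),
    solInner m p tm (xs ++ ys) cnt acc =
      (let r := solInner m p tm xs cnt acc
       if r.2.2 then r else solInner m p tm ys r.2.1 r.1) := by
  intro xs
  induction xs with
  | nil => intro ys cnt acc; simp [solInner]
  | cons c rest ih =>
    intro ys cnt acc
    simp only [List.cons_append, solInner]
    by_cases hbr : tm ≤ cnt + 1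
    · simp [hbr]
    · simp only [if_neg hbr]
      exact ih ys (cnt + 1) _

theorem solInner_no_break_lt (m p tm : Int) : ∀ (cs : List Char) (cnt : Int) (acc : List Char),
    cnt < tm → (solInner m p tm cs cnt acc).2.2 = false →
    (solInner m p tm cs cnt acc).2.1 < tm := by
  intro cs
  induction cs with
  | nil => intro cnt acc h _; simpa [solInner] using h
  | cons c rest ih =>
    intro cnt acc h hb
    simp only [solInner] at hb ⊢
    by_cases hbr : tm ≤ cnt + 1
    · simp [hbr] at hb
    · simp only [if_neg hbr] at hb ⊢
      exact ih (cnt + 1) _ (by omega) hb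

theorem solOuter_eq_flat (m p tm : Int) : ∀ (ss : List String) (cnt : Int) (acc : List Char),
    cnt < tm →
    solOuter m p tm ss cnt acc = (solInner m p tm (ss.flatMap String.toList) cnt acc).1 := by
  intro ss
  induction ss with
  | nil => intro cnt acc _; simp [solOuter, solInner]
  | cons s rest ih =>
    intro cnt acc h
    simp only [solOuter, List.flatMap_cons, solInner_append]
    cases hbr : (solInner m p tm s.toList cnt acc).2.2
    · have hlt := solInner_no_break_lt m p tm s.toList cnt acc h hbr
      simp only [Bool.false_eq_true, if_false,
        if_neg (by omega : ¬ tm ≤ (solInner m p tm s.toList cnt acc).2.1)]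
      exact ih _ _ hlt
    · simp

theorem solInner_eq_chPick (m p tm : Int) : ∀ (cs : List Char) (cnt : Int) (acc : List Char),
    cnt < tm → (solInner m p tm cs cnt acc).1 = acc ++ chPick m p tm cs cnt := by
  intro cs
  induction cs with
  | nil => intro cnt acc _; simp [solInner, chPick]
  | cons c rest ih =>
    intro cnt acc h
    simp only [solInner, chPick, if_neg (by omega : ¬ tm ≤ cnt)]
    by_cases hbr : tm ≤ cnt + 1
    · rw [if_pos hbr, chPick_stop m p tm rest (cnt + 1) hbr]
      by_cases hm : PySem.Int.mod cnt m = p - 1 <;> simp [hm]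
    · rw [if_neg hbr, ih (cnt + 1) _ (by omega)]
      by_cases hm : PySem.Int.mod cnt m = p - 1 <;> simp [hm]

-- ---------- the pointer-jumping picker pA, and both programs reduced to it ----------

def pA (m tm : Int) : List Char → Int → Int → (List Char × Int)
  | [], _, nxt => ([], nxt)
  | c :: rest, cnt, nxt =>
    if tm ≤ cnt then ([], nxt)
    else if cnt = nxt then
      let r := pA m tm rest (cnt + 1) (nxt + m)
      (c :: r.1, r.2)
    else pA m tm rest (cnt + 1) nxt

theorem pA_tmle (m tm : Int) (cs : List Char) (cnt nxt : Int) (h : tm ≤ cnt) :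
    pA m tm cs cnt nxt = ([], nxt) := by
  cases cs <;> simp [pA, h]

theorem pA_stop (m tm : Int) : ∀ (cs : List Char) (cnt nxt : Int), tm ≤ nxt →
    pA m tm cs cnt nxt = ([], nxt) := by
  intro cs
  induction cs with
  | nil => intro cnt nxt _; rfl
  | cons c rest ih =>
    intro cnt nxt h
    by_cases htm : tm ≤ cnt
    · simp [pA, htm]
    · have hne : cnt ≠ nxt := by omega
      simp only [pA, if_neg htm, if_neg hne]
      exact ih (cnt + 1) nxt h

theorem pA_past (m tm : Int) : ∀ (cs : List Char) (cnt nxt : Int), cnt + cs.length ≤ nxt →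
    pA m tm cs cnt nxt = ([], nxt) := by
  intro cs
  induction cs with
  | nil => intro cnt nxt _; rfl
  | cons c rest ih =>
    intro cnt nxt h
    simp only [List.length_cons] at h
    have hne : cnt ≠ nxt := by omega
    by_cases htm : tm ≤ cnt
    · simp [pA, htm]
    · simp only [pA, if_neg htm, if_neg hne]
      exact ih (cnt + 1) nxt (by omega)

theorem pA_append (m tm : Int) : ∀ (xs ys : List Char) (cnt nxt : Int),
    pA m tm (xs ++ ys) cnt nxt =
      ((pA m tm xs cnt nxt).1 ++ (pA m tm ys (cnt + xs.length) (pA m tm xs cnt nxt).2).1,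
       (pA m tm ys (cnt + xs.length) (pA m tm xs cnt nxt).2).2) := by
  intro xs
  induction xs with
  | nil => intro ys cnt nxt; simp [pA]
  | cons c rest ih =>
    intro ys cnt nxt
    have harith : cnt + 1 + (rest.length : Int) = cnt + ((rest.length : Int) + 1) := by omega
    by_cases htm : tm ≤ cnt
    · simp only [List.cons_append, pA, if_pos htm]
      rw [pA_tmle m tm ys _ nxt (by simp; omega)]
      simp
    · by_cases hpk : cnt = nxt
      · simp only [List.cons_append, pA, if_neg htm, if_pos hpk]
        rw [ih ys (cnt + 1) (nxt + m)]
        simp only [List.length_cons]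
        rw [harith]
        simp
      · simp only [List.cons_append, pA, if_neg htm, if_neg hpk]
        rw [ih ys (cnt + 1) nxt]
        simp only [List.length_cons]
        rw [harith]
        norm_cast

theorem pA_exit (m tm : Int) (hm : 1 ≤ m) : ∀ (cs : List Char) (cnt nxt : Int), cnt ≤ nxt →
    nxt ≤ (pA m tm cs cnt nxt).2 ∧
      ((pA m tm cs cnt nxt).2 < tm → cnt + cs.length ≤ (pA m tm cs cnt nxt).2) := by
  intro cs
  induction cs with
  | nil => intro cnt nxt h; simp [pA]; omega
  | cons c rest ih =>
    intro cnt nxt h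
    by_cases htm : tm ≤ cnt
    · simp [pA, htm]; omega
    · by_cases hpk : cnt = nxt
      · simp only [pA, if_neg htm, if_pos hpk]
        have := ih (cnt + 1) (nxt + m) (by omega)
        simp only [List.length_cons]
        constructor
        · omega
        · intro hlt
          have := this.2 hlt
          omega
      · simp only [pA, if_neg htm, if_neg hpk]
        have := ih (cnt + 1) nxt (by omega)
        simp only [List.length_cons]
        constructor
        · exact this.1
        · intro hlt
          have := this.2 hlt
          omega

theorem mod_shift (m nxt : Int) (hm : 1 ≤ m) :
    PySem.Int.mod (nxt + m) m = PySem.Int.mod nxt m := by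
  rw [PySem.Int.mod_eq_emod_of_pos (by omega), PySem.Int.mod_eq_emod_of_pos (by omega)]
  have h := Int.add_mul_emod_self_left nxt m 1
  rw [mul_one] at h
  exact h

theorem chPick_eq_pA (m p tm : Int) (hm : 1 ≤ m) (hp0 : 0 ≤ p - 1) (hpm : p - 1 < m) :
    ∀ (cs : List Char) (cnt nxt : Int),
    cnt ≤ nxt → nxt - m < cnt → PySem.Int.mod nxt m = p - 1 →
    chPick m p tm cs cnt = (pA m tm cs cnt nxt).1 := by
  intro cs
  induction cs with
  | nil => intro cnt nxt _ _ _; rfl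
  | cons c rest ih =>
    intro cnt nxt h1 h2 h3
    by_cases htm : tm ≤ cnt
    · simp [chPick, pA, htm]
    · have hkey : PySem.Int.mod cnt m = p - 1 ↔ cnt = nxt := by
        constructor
        · intro hc
          have e1 := PySem.Int.floordiv_mul_add_mod cnt m
          have e2 := PySem.Int.floordiv_mul_add_mod nxt m
          rw [hc] at e1; rw [h3] at e2
          set q1 := PySem.Int.floordiv cnt m
          set q2 := PySem.Int.floordiv nxt m
          have hd : nxt - cnt = (q2 - q1) * m := by ring_nf; omega
          rcases lt_trichotomy (q2 - q1) 0 with hq | hq | hq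
          · nlinarith
          · rw [hq] at hd; simp at hd; omega
          · nlinarith
        · intro hc; rw [hc, h3]
      by_cases hpk : cnt = nxt
      · have hmod : PySem.Int.mod cnt m = p - 1 := hkey.mpr hpk
        simp only [chPick, pA, if_neg htm, if_pos hpk, if_pos hmod]
        simp only [List.singleton_append, List.cons.injEq, true_and]
        exact ih (cnt + 1) (nxt + m) (by omega) (by omega) (by rw [mod_shift m nxt hm]; exact h3)
      · have hmod : ¬ PySem.Int.mod cnt m = p - 1 := fun hc => hpk (hkey.mp hc)
        simp only [chPick, pA, if_neg htm, if_neg hpk, if_neg hmod, List.nil_append]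
        exact ih (cnt + 1) nxt (by omega) (by omega) h3

theorem pA_pick (m tm : Int) (hm : 1 ≤ m) : ∀ (cs : List Char) (cnt nxt : Int),
    cnt ≤ nxt → nxt < cnt + cs.length → nxt < tm →
    pA m tm cs cnt nxt =
      (cs.getD (nxt - cnt).toNat ' ' :: (pA m tm cs cnt (nxt + m)).1,
       (pA m tm cs cnt (nxt + m)).2) := by
  intro cs
  induction cs with
  | nil => intro cnt nxt h1 h2 _; simp at h2; omega
  | cons c rest ih =>
    intro cnt nxt h1 h2 h3
    have htm : ¬ tm ≤ cnt := by omega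
    by_cases hpk : cnt = nxt
    · have hne : ¬ cnt = nxt + m := by omega
      simp only [pA, if_neg htm, if_pos hpk, if_neg hne]
      have : (nxt - cnt).toNat = 0 := by omega
      simp [this]
    · have h1' : cnt + 1 ≤ nxt := by omega
      have hne : ¬ cnt = nxt + m := by omega
      simp only [pA, if_neg htm, if_neg hpk, if_neg hne]
      rw [ih (cnt + 1) nxt h1' (by simp at h2 ⊢; omega) h3]
      have hidx : (nxt - cnt).toNat = (nxt - (cnt + 1)).toNat + 1 := by omega
      simp [hidx]

theorem altInner_eq_pA (m tm : Int) (hm : 1 ≤ m) : ∀ (fuel : Nat) (d : List Char) (pos nxt : Int) (out : List Char),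
    pos ≤ nxt → pos + d.length - nxt + 1 ≤ (fuel : Int) →
    altInner m tm d pos fuel nxt out = (out ++ (pA m tm d pos nxt).1, (pA m tm d pos nxt).2) := by
  intro fuel
  induction fuel with
  | zero =>
    intro d pos nxt out h1 h2
    simp only [Nat.cast_zero] at h2
    rw [pA_past m tm d pos nxt (by omega)]
    simp [altInner]
  | succ fuel ih =>
    intro d pos nxt out h1 h2
    by_cases hc : nxt < pos + (d.length : Int) ∧ nxt < tm
    · obtain ⟨hc1, hc2⟩ := hc
      have hidx : PySem.List.pyGet? d (nxt - pos) = some (d.getD (nxt - pos).toNat ' ') := by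
        have hnn : (0 : Int) ≤ nxt - pos := by omega
        rw [PySem.List.pyGet?_of_nonneg d hnn]
        rw [List.getElem?_eq_getElem (by omega)]
        rw [List.getD_eq_getElem _ _ (by omega)]
      simp only [altInner, if_pos (And.intro hc1 hc2), hidx]
      rw [pA_pick m tm hm d pos nxt h1 (by omega) hc2]
      rw [ih d pos (nxt + m) (out ++ [d.getD (nxt - pos).toNat ' ']) (by omega)
            (by push_cast at h2 ⊢; omega)]
      simp
    · simp only [altInner, if_neg hc]
      rcases (by omega : tm ≤ nxt ∨ pos + (d.length : Int) ≤ nxt) with h | h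
      · rw [pA_stop m tm d pos nxt h]; simp
      · rw [pA_past m tm d pos nxt (by omega)]; simp

-- the tail of the digit stream, from number k on (numbers below tm)
def flatFrom (n tm : Int) (k : Int) : List Char :=
  (PySem.List.pyRange k tm 1).flatMap (fun j => (digitsB n j).toList)

theorem flatFrom_cons (n tm k : Int) (h : k < tm) :
    flatFrom n tm k = (digitsB n k).toList ++ flatFrom n tm (k + 1) := by
  unfold flatFrom
  rw [PySem.List.pyRange_one_cons h]
  simp

theorem flatFrom_nil (n tm k : Int) (h : tm ≤ k) : flatFrom n tm k = [] := by
  unfold flatFrom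
  rw [PySem.List.pyRange_one_eq_nil h]
  simp

theorem altOuter_eq_pA (n m tm : Int) (hm : 1 ≤ m) :
    ∀ (fuel : Nat) (i pos nxt : Int) (out : List Char),
    i ≤ pos → (nxt < tm → pos ≤ nxt) → tm - i + 1 ≤ (fuel : Int) →
    altOuter n m tm fuel i pos nxt out = out ++ (pA m tm (flatFrom n tm i) pos nxt).1 := by
  intro fuel
  induction fuel with
  | zero =>
    intro i pos nxt out h1 h2 h3
    simp only [Nat.cast_zero] at h3
    rw [flatFrom_nil n tm i (by omega)]
    by_cases hn : nxt < tm
    · have := h2 hn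
      simp [altOuter, pA]
    · simp [altOuter, pA]
  | succ fuel ih =>
    intro i pos nxt out h1 h2 h3
    by_cases hn : nxt < tm
    · have hpos := h2 hn
      have hilt : i < tm := by omega
      rw [flatFrom_cons n tm i hilt]
      set d := (digitsB n i).toList with hd
      simp only [altOuter, if_pos hn, ← hd]
      rw [altInner_eq_pA m tm hm (d.length + 1) d pos nxt out hpos (by push_cast; omega)]
      rw [pA_append m tm d (flatFrom n tm (i + 1)) pos nxt]
      simp only []
      have hdne : d ≠ [] := digitsB_ne_nil n i
      have hdlen : 1 ≤ (d.length : Int) := by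
        have : d.length ≠ 0 := fun h => hdne (List.eq_nil_of_length_eq_zero h)
        omega
      have hexit := pA_exit m tm hm d pos nxt hpos
      rw [ih (i + 1) (pos + d.length) (pA m tm d pos nxt).2 (out ++ (pA m tm d pos nxt).1)
            (by omega) (fun hlt => by have := hexit.2 hlt; omega) (by push_cast at h3 ⊢; omega)]
      simp
    · rw [pA_stop m tm (flatFrom n tm i) pos nxt (by omega)]
      simp [altOuter, hn]

-- ---------- no-match cases: p outside [1, m] ----------

theorem solInner_no_match (m p tm : Int) (hm : 1 ≤ m) (hp : p - 1 < 0 ∨ m ≤ p - 1) :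
    ∀ (cs : List Char) (cnt : Int) (acc : List Char), 0 ≤ cnt →
    (solInner m p tm cs cnt acc).1 = acc ∧ 0 ≤ (solInner m p tm cs cnt acc).2.1 := by
  intro cs
  induction cs with
  | nil => intro cnt acc h; simpa [solInner] using h
  | cons c rest ih =>
    intro cnt acc h
    have hmod : ¬ PySem.Int.mod cnt m = p - 1 := by
      have h1 : 0 ≤ PySem.Int.mod cnt m := PySem.Int.mod_nonneg cnt (by omega)
      have h2 : PySem.Int.mod cnt m < m := PySem.Int.mod_lt cnt (by omega)
      omega
    simp only [solInner, if_neg hmod]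
    by_cases hbr : tm ≤ cnt + 1
    · simp [hbr]; omega
    · simp only [if_neg hbr]
      exact ih (cnt + 1) acc (by omega)

theorem solOuter_no_match (m p tm : Int) (hm : 1 ≤ m) (hp : p - 1 < 0 ∨ m ≤ p - 1) :
    ∀ (ss : List String) (cnt : Int) (acc : List Char), 0 ≤ cnt →
    solOuter m p tm ss cnt acc = acc := by
  intro ss
  induction ss with
  | nil => intro cnt acc _; rfl
  | cons s rest ih =>
    intro cnt acc h
    have hin := solInner_no_match m p tm hm hp s.toList cnt acc h
    simp only [solOuter]
    split
    · exact hin.1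
    · split
      · exact hin.1
      · rw [hin.1]
        exact ih _ acc hin.2

-- ---------- assembly ----------

theorem mod_zero_pos (m : Int) (hm : 1 ≤ m) : PySem.Int.mod 0 m = 0 := by
  rw [PySem.Int.mod_eq_emod_of_pos (by omega)]
  simp

theorem solution_eq_of_main (n t m p : Int) (hm : 1 ≤ m)
    (hp1 : 1 ≤ p) (hpm : p ≤ m) (ht : 1 ≤ t) :
    solution n t m p = solution_alt n t m p := by
  have htm : 1 ≤ t * m := by nlinarith
  unfold solution solution_alt
  rw [if_neg (by omega)]
  congr 1
  -- A side
  rw [solOuter_eq_flat m p (t * m) _ 0 [] (by omega)]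
  rw [solInner_eq_chPick m p (t * m) _ 0 [] (by omega)]
  have hdz : digitsB n 0 = "0" := by simp [digitsB]
  have hstream :
      (("0" :: (PySem.List.pyRange 1 (t * m) 1).map (getNbase n)).flatMap String.toList)
        = flatFrom n (t * m) 0 := by
    rw [flatFrom_cons n (t * m) 0 (by omega), hdz]
    simp only [List.flatMap_cons, zero_add]
    congr 1
    unfold flatFrom
    rw [List.flatMap_def, List.map_map]
    rw [← List.flatMap_def]
    exact List.flatMap_congr (fun j hj => by
      have := (PySem.List.mem_pyRange_one).1 hj
      simp only [Function.comp_apply]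
      rw [digits_match n j (by omega)])
  rw [List.nil_append, hstream]
  rw [chPick_eq_pA m p (t * m) hm (by omega) (by omega) (flatFrom n (t * m) 0) 0 (p - 1)
        (by omega) (by omega)
        (by rw [PySem.Int.mod_eq_emod_of_pos (by omega)]; rw [Int.emod_eq_of_lt (by omega) (by omega)])]
  -- B side
  rw [altOuter_eq_pA n m (t * m) hm _ 0 0 (p - 1) [] (by omega) (fun _ => by omega)
        (by push_cast [Int.natCast_natAbs]; rw [abs_of_nonneg (by omega : (0 : Int) ≤ t * m)]; omega)]
  simp

theorem solution_empty_of_t_le (n t m p : Int) (hm : 1 ≤ m) (ht : t ≤ 0) (hp : p ≠ 1) :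
    solution n t m p = "" := by
  have htm : t * m ≤ 0 := mul_nonpos_of_nonpos_of_nonneg ht (by omega)
  unfold solution
  rw [PySem.List.pyRange_one_eq_nil (by omega)]
  simp only [List.map_nil]
  have hmod : ¬ PySem.Int.mod 0 m = p - 1 := by
    rw [mod_zero_pos m hm]
    omega
  have h0 : ("0" : String).toList = ['0'] := rfl
  simp only [solOuter, h0, solInner, if_neg hmod, if_pos (by omega : t * m ≤ 0 + 1)]
  rfl

theorem solution_zero_of_D (n t m p : Int) (hm : 1 ≤ m) (ht : t ≤ 0) (hp : p = 1) :
    solution n t m p = "0" := by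
  have htm : t * m ≤ 0 := mul_nonpos_of_nonpos_of_nonneg ht (by omega)
  unfold solution
  rw [PySem.List.pyRange_one_eq_nil (by omega)]
  simp only [List.map_nil]
  have hmod : PySem.Int.mod 0 m = p - 1 := by
    rw [mod_zero_pos m hm]; omega
  have h0 : ("0" : String).toList = ['0'] := rfl
  simp only [solOuter, h0, solInner, if_pos hmod, if_pos (by omega : t * m ≤ 0 + 1)]
  rfl


-- ===== VERDICT (by name: the statement is the Claim_ definition above) =====
theorem solution_spec : Claim_unchanged_solution := by
  intro n t m p _ hpre
  obtain ⟨hm, -⟩ := hpre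
  intro hnd
  unfold D_solution at hnd
  by_cases hp : 1 ≤ p ∧ p ≤ m
  · by_cases ht : 1 ≤ t
    · exact solution_eq_of_main n t m p hm hp.1 hp.2 ht
    · have hp1 : p ≠ 1 := fun h => hnd ⟨by omega, h⟩
      rw [solution_empty_of_t_le n t m p hm (by omega) hp1]
      unfold solution_alt
      rw [if_pos (by omega)]
  · have hA : solution n t m p = "" := by
      unfold solution
      rw [solOuter_no_match m p (t * m) hm (by omega) _ 0 [] (by omega)]
    rw [hA]
    unfold solution_alt
    rw [if_pos (by omega)]
theorem solution_changed : Claim_changed_solution := by unfold Claim_changed_solution; decide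
theorem solution_tight : Claim_exact_solution := by
  intro n t m p _ hpre hd
  obtain ⟨hm, -⟩ := hpre
  obtain ⟨ht, hp⟩ := hd
  rw [solution_zero_of_D n t m p hm ht hp]
  unfold solution_alt
  rw [if_pos (by omega)]
  decide
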